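-- pv_equiv track=rewrite | github.com/hanui-o/hanui | apps/docs/update-imports.py | categorize_imports
-- ===== SOURCE A (Python) =====
-- CONTENT_COMPONENTS = {'PageSection', 'Section', 'SectionHeading', 'Subsection', 'PageNavigation', 'CodeBlock'}
--
-- HELPER_COMPONENTS = {'DoCard', 'DontCard', 'SimpleGrid', 'Wrap'}
--
-- def categorize_imports(imports):
--     """Categorize imports into content, helpers, and UI components"""
--     content = []
--     helpers = []
--     ui = []
--
--     for imp in imports:
--         if imp in CONTENT_COMPONENTS:
--             # Handle Section -> PageSection as Section alias
--             if imp == 'Section':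
--                 content.append('PageSection as Section')
--             else:
--                 content.append(imp)
--         elif imp in HELPER_COMPONENTS:
--             helpers.append(imp)
--         else:
--             ui.append(imp)
--
--     return content, helpers, ui
-- ===== SOURCE B (Python) =====
-- CONTENT_COMPONENTS = {'PageSection', 'Section', 'SectionHeading', 'Subsection', 'PageNavigation', 'CodeBlock'}
--
-- HELPER_COMPONENTS = {'DoCard', 'DontCard', 'SimpleGrid', 'Wrap'}
--
-- def categorize_imports(imports):
--     """Categorize imports: stable-sort by category number, then split at the bucket
--     boundaries (stability keeps each bucket in original order)."""
--     def category(imp):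
--         if imp in CONTENT_COMPONENTS:
--             return 0
--         if imp in HELPER_COMPONENTS:
--             return 1
--         return 2
--     ordered = sorted(imports, key=category)
--     n_content = sum(1 for imp in imports if category(imp) == 0)
--     n_helper = sum(1 for imp in imports if category(imp) == 1)
--     content = ['PageSection as Section' if imp == 'Section' else imp
--                for imp in ordered[:n_content]]
--     return content, ordered[n_content:n_content + n_helper], ordered[n_content + n_helper:]
-- ===== Notes on version B (the rewrite author's own statement) =====
-- stated objective: alternative
-- what changed: Replaces A's one-pass three-way dispatch loop with a bucket sort: stable-sort the imports by a numeric category key, count the first two buckets, and split the sorted list at those boundaries (stability preserves each bucket's original order); the Section rename is applied to the content slice.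
import Mathlib
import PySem

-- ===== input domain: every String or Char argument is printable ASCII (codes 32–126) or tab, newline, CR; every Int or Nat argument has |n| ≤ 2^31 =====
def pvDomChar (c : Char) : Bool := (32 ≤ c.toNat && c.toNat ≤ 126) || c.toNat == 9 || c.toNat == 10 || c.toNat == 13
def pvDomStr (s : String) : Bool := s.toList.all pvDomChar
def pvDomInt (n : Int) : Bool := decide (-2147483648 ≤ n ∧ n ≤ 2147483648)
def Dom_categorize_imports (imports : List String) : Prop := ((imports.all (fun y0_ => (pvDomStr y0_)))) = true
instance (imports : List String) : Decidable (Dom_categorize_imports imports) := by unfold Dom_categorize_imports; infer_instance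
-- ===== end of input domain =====

-- B replaces A's one-pass three-way dispatch loop with a bucket sort: stable-sort by a numeric
-- category key, then split the sorted list at the bucket boundaries (objective: alternative).

-- ===== PORT A =====
-- Python sets of component names (membership test only)
def CONTENT_COMPONENTS : List String := ["PageSection", "Section", "SectionHeading", "Subsection", "PageNavigation", "CodeBlock"]
def HELPER_COMPONENTS : List String := ["DoCard", "DontCard", "SimpleGrid", "Wrap"]

-- A: one loop dispatching each import into one of three accumulated lists (append at the end)
def categorize_imports (imports : List String) : List String × List String × List String :=
  imports.foldl (fun (st : List String × List String × List String) imp =>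
    if CONTENT_COMPONENTS.contains imp then
      if imp = "Section" then (st.1 ++ ["PageSection as Section"], st.2.1, st.2.2)
      else (st.1 ++ [imp], st.2.1, st.2.2)
    else if HELPER_COMPONENTS.contains imp then (st.1, st.2.1 ++ [imp], st.2.2)
    else (st.1, st.2.1, st.2.2 ++ [imp])) ([], [], [])

-- ===== PORT B =====
-- Source B's inner 'category': 0 = content, 1 = helper, 2 = ui
def pyCategory (imp : String) : Nat :=
  if CONTENT_COMPONENTS.contains imp then 0
  else if HELPER_COMPONENTS.contains imp then 1
  else 2

-- B: stable sort by category, count the first two buckets, split the sorted list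
def categorize_imports_alt (imports : List String) : List String × List String × List String :=
  let ordered := PySem.List.sorted imports pyCategory
  let nContent : Int := (imports.countP (fun imp => pyCategory imp == 0) : Int)
  let nHelper : Int := (imports.countP (fun imp => pyCategory imp == 1) : Int)
  let content := (PySem.List.slice ordered none (some nContent)).map
      (fun imp => if imp = "Section" then "PageSection as Section" else imp)
  (content,
   PySem.List.slice ordered (some nContent) (some (nContent + nHelper)),
   PySem.List.slice ordered (some (nContent + nHelper)) none)

-- ===== PRECONDITION & SPEC =====
def Spec_categorize_imports (imports : List String) (out : List String × List String × List String) : Prop := out = categorize_imports_alt imports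
instance (imports : List String) (out : List String × List String × List String) : Decidable (Spec_categorize_imports imports out) := by unfold Spec_categorize_imports; infer_instance

-- ===== CLAIM (what is proved, stated in full; the proofs are below) =====
def Claim_equal_categorize_imports : Prop := ∀ (imports : List String), Dom_categorize_imports imports → Spec_categorize_imports imports (categorize_imports imports)

-- ===== LEMMAS AND PROOFS =====
theorem insertBy_skip {α : Type} (bef : α → α → Bool) (x : α) (a r : List α)
    (h : ∀ y ∈ a, bef x y = false) :
    PySem.List.insertBy bef x (a ++ r) = a ++ PySem.List.insertBy bef x r := by
  induction a with
  | nil => simp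
  | cons y ys ih =>
    have hy : bef x y = false := h y (List.mem_cons_self)
    simp only [List.cons_append, PySem.List.insertBy, hy, Bool.false_eq_true, if_false]
    rw [ih (fun z hz => h z (List.mem_cons_of_mem _ hz))]

theorem insertBy_front {α : Type} (bef : α → α → Bool) (x : α) (r : List α)
    (h : ∀ y ∈ r, bef x y = true) :
    PySem.List.insertBy bef x r = x :: r := by
  cases r with
  | nil => rfl
  | cons y ys => simp [PySem.List.insertBy, h y List.mem_cons_self]

-- the stable insertion-sort fold splits the list into the three category buckets, in order
theorem sorted_cat_inv (xs : List String) (a b c : List String)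
    (ha : ∀ y ∈ a, pyCategory y = 0) (hb : ∀ y ∈ b, pyCategory y = 1)
    (hc : ∀ y ∈ c, pyCategory y = 2) :
    xs.foldl (fun acc x => PySem.List.insertBy (fun p q => decide (pyCategory p < pyCategory q)) x acc)
        (a ++ b ++ c)
    = (a ++ xs.filter (fun i => pyCategory i == 0)) ++
      (b ++ xs.filter (fun i => pyCategory i == 1)) ++
      (c ++ xs.filter (fun i => pyCategory i == 2)) := by
  induction xs generalizing a b c with
  | nil => simp
  | cons x xs ih =>
    rw [List.foldl_cons, List.filter_cons, List.filter_cons, List.filter_cons]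
    have hcat : pyCategory x = 0 ∨ pyCategory x = 1 ∨ pyCategory x = 2 := by
      unfold pyCategory; split_ifs <;> simp
    rcases hcat with h0 | h1 | h2
    · have : PySem.List.insertBy (fun p q => decide (pyCategory p < pyCategory q)) x (a ++ b ++ c)
          = (a ++ [x]) ++ b ++ c := by
        rw [List.append_assoc,
          insertBy_skip _ _ a (b ++ c) (fun y hy => by simp [ha y hy, h0]),
          insertBy_front _ _ (b ++ c) (fun y hy => by
            rcases List.mem_append.mp hy with hy' | hy'
            · simp [hb y hy', h0]
            · simp [hc y hy', h0])]
        simp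
      rw [this, ih (a ++ [x]) b c
        (fun y hy => by rcases List.mem_append.mp hy with hy' | hy'
                        · exact ha y hy'
                        · simp_all) hb hc]
      simp [h0]
    · have : PySem.List.insertBy (fun p q => decide (pyCategory p < pyCategory q)) x (a ++ b ++ c)
          = a ++ (b ++ [x]) ++ c := by
        rw [List.append_assoc,
          insertBy_skip _ _ a (b ++ c) (fun y hy => by simp [ha y hy, h1]),
          insertBy_skip _ _ b c (fun y hy => by simp [hb y hy, h1]),
          insertBy_front _ _ c (fun y hy => by simp [hc y hy, h1])]
        simp
      rw [this, ih a (b ++ [x]) c ha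
        (fun y hy => by rcases List.mem_append.mp hy with hy' | hy'
                        · exact hb y hy'
                        · simp_all) hc]
      simp [h1]
    · have : PySem.List.insertBy (fun p q => decide (pyCategory p < pyCategory q)) x (a ++ b ++ c)
          = a ++ b ++ (c ++ [x]) := by
        rw [PySem.List.insertBy_of_forall_not_before _ _ _ (fun y hy => by
          have : pyCategory y = 0 ∨ pyCategory y = 1 ∨ pyCategory y = 2 := by
            unfold pyCategory; split_ifs <;> simp
          rcases this with h | h | h <;> simp [h, h2])]
        simp
      rw [this, ih a b (c ++ [x]) ha hb
        (fun y hy => by rcases List.mem_append.mp hy with hy' | hy'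
                        · exact hc y hy'
                        · simp_all)]
      simp [h2]

theorem sorted_cat (xs : List String) :
    PySem.List.sorted xs pyCategory
    = xs.filter (fun i => pyCategory i == 0) ++
      xs.filter (fun i => pyCategory i == 1) ++
      xs.filter (fun i => pyCategory i == 2) := by
  rw [PySem.List.sorted_eq_foldl_insertBy]
  have := sorted_cat_inv xs [] [] [] (by simp) (by simp) (by simp)
  simpa using this

-- A's fold, from any start state, appends the three category buckets (content renamed)
theorem categorize_foldl_inv (imports : List String) (c h u : List String) :
    imports.foldl (fun (st : List String × List String × List String) imp =>
      if CONTENT_COMPONENTS.contains imp then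
        if imp = "Section" then (st.1 ++ ["PageSection as Section"], st.2.1, st.2.2)
        else (st.1 ++ [imp], st.2.1, st.2.2)
      else if HELPER_COMPONENTS.contains imp then (st.1, st.2.1 ++ [imp], st.2.2)
      else (st.1, st.2.1, st.2.2 ++ [imp])) (c, h, u)
    = (c ++ (imports.filter (fun i => pyCategory i == 0)).map
          (fun imp => if imp = "Section" then "PageSection as Section" else imp),
       h ++ imports.filter (fun i => pyCategory i == 1),
       u ++ imports.filter (fun i => pyCategory i == 2)) := by
  induction imports generalizing c h u with
  | nil => simp
  | cons x xs ih =>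
    rw [List.foldl_cons, List.filter_cons, List.filter_cons, List.filter_cons]
    by_cases hc0 : CONTENT_COMPONENTS.contains x = true
    · have hx : pyCategory x = 0 := by
        have h' : x ∈ CONTENT_COMPONENTS := by simpa using hc0
        simp [pyCategory, h']
      by_cases hs : x = "Section"
      · subst hs
        rw [if_pos hc0, if_pos rfl, ih]
        simp [hx]
      · rw [if_pos hc0, if_neg hs, ih]
        simp [hx, hs]
    · by_cases hh1 : HELPER_COMPONENTS.contains x = true
      · have hx : pyCategory x = 1 := by
          have h' : x ∉ CONTENT_COMPONENTS := by simpa using hc0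
          have h'' : x ∈ HELPER_COMPONENTS := by simpa using hh1
          simp [pyCategory, h', h'']
        rw [if_neg hc0, if_pos hh1, ih]
        simp [hx]
      · have hx : pyCategory x = 2 := by
          have h' : x ∉ CONTENT_COMPONENTS := by simpa using hc0
          have h'' : x ∉ HELPER_COMPONENTS := by simpa using hh1
          simp [pyCategory, h', h'']
        rw [if_neg hc0, if_neg hh1, ih]
        simp [hx]

-- ===== VERDICT (by name: the statement is the Claim_ definition above) =====
theorem categorize_imports_spec : Claim_equal_categorize_imports := by
  intro imports _
  show categorize_imports imports = categorize_imports_alt imports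
  unfold categorize_imports categorize_imports_alt
  rw [categorize_foldl_inv]
  set F0 := imports.filter (fun i => pyCategory i == 0) with hF0
  set F1 := imports.filter (fun i => pyCategory i == 1) with hF1
  set F2 := imports.filter (fun i => pyCategory i == 2) with hF2
  have hsort : PySem.List.sorted imports pyCategory = F0 ++ F1 ++ F2 := sorted_cat imports
  have hn0 : imports.countP (fun imp => pyCategory imp == 0) = F0.length :=
    List.countP_eq_length_filter
  have hn1 : imports.countP (fun imp => pyCategory imp == 1) = F1.length :=
    List.countP_eq_length_filter
  simp only [hsort, hn0, hn1]
  refine Prod.ext ?_ (Prod.ext ?_ ?_)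
  · rw [PySem.List.slice_to_natCast]
    simp [List.take_append, List.append_assoc]
  · rw [PySem.List.slice_natCast_add]
    simp [List.drop_append, List.take_append, List.append_assoc]
  · rw [show ((F0.length : Int) + (F1.length : Int)) = ((F0.length + F1.length : Nat) : Int) by push_cast; ring,
      PySem.List.slice_from_natCast]
    simp [List.drop_append, List.append_assoc]
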